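-- pv_equiv track=rewrite | github.com/Furisto/sagetrac-mirror | src/sage/coding/reed_muller_code.py | _set_to_mask
-- ===== SOURCE A (Python) =====
-- def _set_to_mask(s, m):
--     r"""
--     Maps the set to an integer.
--     The integer is given by `\sum^{m-1}_{i=0} 2^i\delta(i\in s)`.
--
--     INPUT::
--
--     - ``s`` -- A subset of `\{0,1,\ldots,m-1\}`.
--
--     - ``m`` -- The number of elements in the super set.
--
--     EXAMPLES::
--
--         sage: from sage.coding.reed_muller_code import _set_to_mask
--         sage: _set_to_mask(Set([1,3,4]),5)
--         26
--     """
--     ans = 0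
--     p = 1
--     for i in range(m):
--         if (i in s):
--             ans += p
--         p <<= 1
--     return ans
-- ===== SOURCE B (Python) =====
-- def _set_to_mask(s, m):
--     return sum(1 << i for i in set(s) if 0 <= i < m)
-- ===== Notes on version B (the rewrite author's own statement) =====
-- stated objective: idiomatic
-- what changed: Instead of scanning every i in range(m) and testing membership in s, B iterates over the distinct elements of s and sums their bit values 1<<i, guarded by 0 <= i < m.
import Mathlib
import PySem

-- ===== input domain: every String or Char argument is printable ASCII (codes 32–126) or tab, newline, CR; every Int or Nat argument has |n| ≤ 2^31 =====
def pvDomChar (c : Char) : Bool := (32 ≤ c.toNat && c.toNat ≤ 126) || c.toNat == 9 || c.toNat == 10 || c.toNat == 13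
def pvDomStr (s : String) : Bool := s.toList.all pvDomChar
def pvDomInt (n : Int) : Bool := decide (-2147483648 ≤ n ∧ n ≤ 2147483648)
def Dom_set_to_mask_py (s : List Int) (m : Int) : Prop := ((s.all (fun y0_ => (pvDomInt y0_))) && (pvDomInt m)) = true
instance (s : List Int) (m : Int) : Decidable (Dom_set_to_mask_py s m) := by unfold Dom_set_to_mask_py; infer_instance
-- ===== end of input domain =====

-- B iterates over the distinct elements of s (guarded by 0 ≤ i < m) instead of
-- scanning range(m) and testing membership; objective: idiomatic.

-- ===== PORT A =====
-- literal port of A: ans = 0; p = 1; for i in range(m): if i in s: ans += p; p <<= 1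
def set_to_mask_py (s : List Int) (m : Int) : Int :=
  ((PySem.List.pyRange 0 m 1).foldl
    (fun (st : Int × Int) i => (if s.contains i then st.1 + st.2 else st.1, st.2 * 2))
    (0, 1)).1

-- ===== PORT B =====
-- literal port of B: sum(1 << i for i in set(s) if 0 <= i < m)
def set_to_mask_py_alt (s : List Int) (m : Int) : Int :=
  (PySem.Set.ofList s).foldl
    (fun acc i => if 0 ≤ i ∧ i < m then acc + 2 ^ i.toNat else acc) 0

-- ===== PRECONDITION & SPEC =====
def Spec_set_to_mask_py (s : List Int) (m : Int) (out : Int) : Prop := out = set_to_mask_py_alt s m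
instance (s : List Int) (m : Int) (out : Int) : Decidable (Spec_set_to_mask_py s m out) := by unfold Spec_set_to_mask_py; infer_instance

-- ===== CLAIM (what is proved, stated in full; the proofs are below) =====
def Claim_equal_set_to_mask_py : Prop := ∀ (s : List Int) (m : Int), Dom_set_to_mask_py s m → Spec_set_to_mask_py s m (set_to_mask_py s m)

-- ===== LEMMAS AND PROOFS =====

-- weighted sum read off A's loop: bit of the head + twice the rest
def wsum (s : List Int) : List Int → Int
  | [] => 0
  | i :: t => (if s.contains i then 1 else 0) + 2 * wsum s t

theorem foldA (s : List Int) : ∀ (l : List Int) (ans p : Int),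
    (l.foldl (fun (st : Int × Int) i =>
      (if s.contains i then st.1 + st.2 else st.1, st.2 * 2)) (ans, p)).1
    = ans + p * wsum s l := by
  intro l
  induction l with
  | nil => intro ans p; simp [wsum]
  | cons a t ih =>
    intro ans p
    simp only [List.foldl_cons, wsum, ih]
    by_cases h : s.contains a = true
    · rw [if_pos h, if_pos h]; ring
    · rw [if_neg h, if_neg h]; ring

theorem sum_map_add (f g : Int → Int) : ∀ (l : List Int),
    (l.map (fun i => f i + g i)).sum = (l.map f).sum + (l.map g).sum := by
  intro l
  induction l with
  | nil => simp
  | cons a t ih => simp [ih]; ring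

theorem sum_map_two_mul (f : Int → Int) : ∀ (l : List Int),
    (l.map (fun i => 2 * f i)).sum = 2 * (l.map f).sum := by
  intro l
  induction l with
  | nil => simp
  | cons a t ih => simp [ih]; ring

-- wsum over a range equals the position-weighted power sum
theorem wsum_range (s : List Int) : ∀ (n : Nat) (a : Int),
    wsum s (PySem.List.pyRange a (a + n) 1)
    = ((PySem.List.pyRange a (a + n) 1).map
        (fun i => if s.contains i then (2:Int) ^ (i - a).toNat else 0)).sum := by
  intro n
  induction n with
  | zero =>
    intro a
    rw [PySem.List.pyRange_one_eq_nil (by omega)]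
    simp [wsum]
  | succ k ih =>
    intro a
    have hlt : a < a + ((k : Int) + 1) := by omega
    have hc := PySem.List.pyRange_one_cons (a := a) (b := a + ((k : Int) + 1)) hlt
    push_cast
    push_cast at hc
    rw [hc]
    simp only [wsum, List.map_cons, List.sum_cons]
    have h1 : a + ((k : Int) + 1) = (a + 1) + (k : Int) := by ring
    rw [h1]
    have ih' := ih (a + 1)
    push_cast at ih'
    rw [ih']
    have h2 : 2 * ((PySem.List.pyRange (a + 1) (a + 1 + (k : Int)) 1).map
        (fun i => if s.contains i then (2:Int) ^ (i - (a + 1)).toNat else 0)).sum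
        = ((PySem.List.pyRange (a + 1) (a + 1 + (k : Int)) 1).map
        (fun i => if s.contains i then (2:Int) ^ (i - a).toNat else 0)).sum := by
      rw [← sum_map_two_mul]
      apply congrArg
      apply List.map_congr_left
      intro i hi
      have hmem := (PySem.List.mem_pyRange_one).1 hi
      have hge : a + 1 ≤ i := hmem.1
      have ht : (i - a).toNat = (i - (a + 1)).toNat + 1 := by omega
      by_cases hcs : s.contains i <;> simp [ht, pow_succ] <;> ring
    rw [← h2]
    have h0 : (a - a).toNat = 0 := by omega
    rw [h0]
    by_cases hca : s.contains a = true
    · rw [if_pos hca, if_pos hca]; norm_num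
    · rw [if_neg hca, if_neg hca]

-- summing a point mass over a nodup list
theorem sum_single (a : Int) (f : Int → Int) : ∀ (l : List Int), l.Nodup →
    (l.map (fun i => if i = a then f i else 0)).sum = if a ∈ l then f a else 0 := by
  intro l
  induction l with
  | nil => simp
  | cons b t ih =>
    intro hnd
    have hbt : b ∉ t := (List.nodup_cons.1 hnd).1
    have ht : t.Nodup := (List.nodup_cons.1 hnd).2
    simp only [List.map_cons, List.sum_cons, ih ht, List.mem_cons]
    by_cases hba : b = a
    · subst hba
      simp [hbt]
    · have : ¬ b = a := hba
      by_cases hat : a ∈ t <;> simp [hba, hat, Ne.symm hba]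

-- B's fold is an accumulator plus a map-sum
theorem foldB (m : Int) : ∀ (l : List Int) (acc : Int),
    l.foldl (fun acc i => if 0 ≤ i ∧ i < m then acc + 2 ^ i.toNat else acc) acc
    = acc + (l.map (fun i => if 0 ≤ i ∧ i < m then (2:Int) ^ i.toNat else 0)).sum := by
  intro l
  induction l with
  | nil => intro acc; simp
  | cons a t ih =>
    intro acc
    simp only [List.foldl_cons, List.map_cons, List.sum_cons, ih]
    by_cases h : 0 ≤ a ∧ a < m <;> simp [h] <;> ring

-- the crux: the subset-sum over a nodup list equals the range scan testing membership in it
theorem crux (m : Int) : ∀ (d : List Int), d.Nodup →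
    (d.map (fun i => if 0 ≤ i ∧ i < m then (2:Int) ^ i.toNat else 0)).sum
    = ((PySem.List.pyRange 0 m 1).map
        (fun i => if d.contains i then (2:Int) ^ i.toNat else 0)).sum := by
  intro d
  induction d with
  | nil => simp
  | cons a t ih =>
    intro hnd
    have hat : a ∉ t := (List.nodup_cons.1 hnd).1
    have ht : t.Nodup := (List.nodup_cons.1 hnd).2
    simp only [List.map_cons, List.sum_cons, ih ht]
    have hpt : ((PySem.List.pyRange 0 m 1).map
        (fun i => if (a :: t).contains i then (2:Int) ^ i.toNat else 0)).sum
        = ((PySem.List.pyRange 0 m 1).map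
            (fun i => (if i = a then (2:Int) ^ i.toNat else 0)
              + (if t.contains i then (2:Int) ^ i.toNat else 0))).sum := by
      apply congrArg
      apply List.map_congr_left
      intro i _
      by_cases hia : i = a
      · subst hia
        simp [hat]
      · simp [hia]
    rw [hpt, sum_map_add, sum_single a _ _ (PySem.List.nodup_pyRange_one 0 m)]
    have hmem : a ∈ PySem.List.pyRange 0 m 1 ↔ 0 ≤ a ∧ a < m := by
      rw [PySem.List.mem_pyRange_one]
    by_cases h : 0 ≤ a ∧ a < m
    · simp [hmem.2 h, h]
    · have : a ∉ PySem.List.pyRange 0 m 1 := fun hc => h (hmem.1 hc)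
      simp [this, h]

-- ===== VERDICT (by name: the statement is the Claim_ definition above) =====
theorem set_to_mask_py_spec : Claim_equal_set_to_mask_py := by
  intro s m _
  unfold Spec_set_to_mask_py set_to_mask_py set_to_mask_py_alt
  rw [foldA, foldB]
  simp only [zero_add, one_mul]
  rw [crux m (PySem.Set.ofList s) (PySem.Set.nodup_ofList s)]
  -- rewrite A's wsum into the same range scan
  have hA : wsum s (PySem.List.pyRange 0 m 1)
      = ((PySem.List.pyRange 0 m 1).map
          (fun i => if s.contains i then (2:Int) ^ i.toNat else 0)).sum := by
    by_cases hm : 0 < m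
    · have h0 : m = 0 + (m.toNat : Int) := by omega
      rw [h0, wsum_range]
      apply congrArg
      apply List.map_congr_left
      intro i _
      simp
    · rw [PySem.List.pyRange_one_eq_nil (by omega)]
      simp [wsum]
  rw [hA]
  apply congrArg
  apply List.map_congr_left
  intro i _
  by_cases h : i ∈ s <;> simp [PySem.Set.mem_ofList, h]
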